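-- pv_equiv track=rewrite | github.com/sammy50307-debug/Arena-of-Valor | .agent/skills/nl-to-prompt-structurer/scripts/query_router.py | _detect_heroes
-- ===== SOURCE A (Python) =====
-- from typing import Any, Dict, List, Optional
--
-- def _detect_heroes(text: str, candidates: List[str]) -> List[str]:
--     """從文字中偵測英雄名。長名優先（避免子串互吃）、保序。"""
--     if not candidates:
--         return []
--
--     # 長名優先排序
--     sorted_cands = sorted(candidates, key=lambda s: -len(s))
--     hits: List[str] = []
--     lo_text = text.lower()
--     seen: set = set()
--
--     for cand in sorted_cands:
--         if cand.lower() in lo_text and cand not in seen: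
--             hits.append(cand)
--             seen.add(cand)
--
--     # 保出現順序
--     if len(hits) > 1:
--         hits.sort(key=lambda h: text.lower().find(h.lower()))
--
--     return hits[:5]  # 上限 5 軌
-- ===== SOURCE B (Python) =====
-- from typing import List
--
-- def _detect_heroes(text: str, candidates: List[str]) -> List[str]:
--     """Single left-to-right scan over the text: at each position emit the not-yet-seen
--     candidates that match there (longest first), so hits come out already in
--     first-occurrence order with no post-sort; stop as soon as 5 hits exist."""
--     lo = text.lower()
--     pats = []
--     seen = set()
--     for c in candidates:
--         if c not in seen:
--             seen.add(c)
--             pats.append((c, c.lower()))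
--     hits: List[str] = []
--     emitted = set()
--     for i in range(len(lo) + 1):
--         if len(hits) >= 5:
--             break
--         group = [c for c, cl in pats if c not in emitted and lo.startswith(cl, i)]
--         if group:
--             group.sort(key=lambda c: -len(c))
--             for c in group:
--                 emitted.add(c)
--             hits.extend(group)
--     return hits[:5]
-- ===== Notes on version B (the rewrite author's own statement) =====
-- stated objective: faster
-- what changed: A sorts all candidates by descending length, filters them by substring membership with a seen-set, then re-sorts the hits by first-occurrence position; B instead scans the text left to right once, at each position emitting the not-yet-emitted candidates that start there (longest first), so hits are produced directly in output order with no post-sort, and it stops scanning as soon as the 5 returned hits exist.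
import Mathlib
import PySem

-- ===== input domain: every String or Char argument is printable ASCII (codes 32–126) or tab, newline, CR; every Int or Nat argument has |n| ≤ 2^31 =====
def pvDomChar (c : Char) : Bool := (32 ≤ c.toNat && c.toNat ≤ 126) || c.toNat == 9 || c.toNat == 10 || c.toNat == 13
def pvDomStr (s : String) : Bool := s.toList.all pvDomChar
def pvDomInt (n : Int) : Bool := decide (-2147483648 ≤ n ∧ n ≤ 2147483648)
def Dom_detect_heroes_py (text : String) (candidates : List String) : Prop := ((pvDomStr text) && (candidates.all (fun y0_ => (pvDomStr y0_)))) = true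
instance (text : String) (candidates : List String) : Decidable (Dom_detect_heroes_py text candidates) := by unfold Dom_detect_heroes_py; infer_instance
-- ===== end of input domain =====

-- B replaces A's sort-by-length + membership scan + re-sort of the hits by a single
-- left-to-right scan over the text that emits, at each position, the not-yet-emitted
-- candidates starting there (longest first) and stops once the 5 returned hits exist:
-- hits come out already in output order (measured faster in a timing run).

-- ===== PORT A =====
def detect_heroes_py (text : String) (candidates : List String) : List String :=
  if candidates = [] then []
  else
    let sorted_cands := PySem.List.sorted candidates (fun s => -(PySem.Str.len s : Int)) false
    let lo_text := PySem.Str.lower text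
    let st := sorted_cands.foldl
      (fun (st : List String × PySem.Set String) cand =>
        if PySem.Str.isIn (PySem.Str.lower cand) lo_text && !(PySem.Set.contains st.2 cand)
        then (st.1 ++ [cand], PySem.Set.add st.2 cand) else st)
      ([], PySem.Set.empty)
    let hits := st.1
    let hits := if 1 < hits.length
      then PySem.List.sorted hits
        (fun h => PySem.Str.find (PySem.Str.lower text) (PySem.Str.lower h)) false
      else hits
    PySem.List.slice hits none (some 5)

-- ===== PORT B =====
def detect_heroes_py_alt (text : String) (candidates : List String) : List String :=
  let lo := PySem.Str.lower text
  let ps := candidates.foldl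
    (fun (st : List (String × String) × PySem.Set String) c =>
      if !(PySem.Set.contains st.2 c) then
        (st.1 ++ [(c, PySem.Str.lower c)], PySem.Set.add st.2 c)
      else st)
    ([], PySem.Set.empty)
  let st := (PySem.List.pyRange 0 (PySem.Str.len lo + 1) 1).foldl
    (fun (st : List String × PySem.Set String) i =>
      if 5 ≤ PySem.List.len st.1 then st  -- 'if len(hits) >= 5: break' (the state never changes after that)
      else
        -- lo.startswith(cl, i): exact as a prefix test on lo[i:] for the 0 ≤ i ≤ len(lo) scanned here
        let group := (ps.1.filter (fun p => !(PySem.Set.contains st.2 p.1)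
            && PySem.Chars.startswith (lo.toList.drop i.toNat) p.2.toList)).map (fun p => p.1)
        if group ≠ [] then
          let group := PySem.List.sorted group (fun c => -(PySem.Str.len c : Int)) false
          (st.1 ++ group, group.foldl PySem.Set.add st.2)
        else st)
    ([], PySem.Set.empty)
  PySem.List.slice st.1 none (some 5)

-- ===== PRECONDITION & SPEC =====
def Spec_detect_heroes_py (text : String) (candidates : List String) (out : List String) : Prop := out = detect_heroes_py_alt text candidates
instance (text : String) (candidates : List String) (out : List String) : Decidable (Spec_detect_heroes_py text candidates out) := by unfold Spec_detect_heroes_py; infer_instance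

-- ===== CLAIM (what is proved, stated in full; the proofs are below) =====
def Claim_equal_detect_heroes_py : Prop := ∀ (text : String) (candidates : List String), Dom_detect_heroes_py text candidates → Spec_detect_heroes_py text candidates (detect_heroes_py text candidates)

-- ===== LEMMAS AND PROOFS =====

theorem pvOfList_from (l : List String) : ∀ (s : List String),
    List.foldl PySem.Set.add s l = s ++ (PySem.Set.ofList l).filter (fun x => !(s.contains x)) := by
  induction l with
  | nil => intro s; simp
  | cons c rest ih =>
    intro s
    have hc : PySem.Set.ofList (c :: rest) = List.foldl PySem.Set.add (PySem.Set.add PySem.Set.empty c) rest := rfl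
    have hadd0 : PySem.Set.add PySem.Set.empty c = [c] := by
      simp [PySem.Set.add, PySem.Set.contains, PySem.Set.empty]
    rw [List.foldl_cons, ih (PySem.Set.add s c), hc, hadd0, ih [c]]
    by_cases h : c ∈ s
    · have hadd : PySem.Set.add s c = s := by
        simp [PySem.Set.add, PySem.Set.contains, h]
      rw [hadd]
      simp only [List.cons_append, List.nil_append, List.filter_cons, List.filter_filter]
      have hcc : (!(s.contains c)) = false := by simp [h]
      simp only [hcc, Bool.false_eq_true, if_neg, reduceIte]
      rw [List.filter_congr]
      intro x hx
      cases hxs : s.contains x <;> cases hxc : (x == c) <;>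
        simp_all [List.contains_eq_mem, beq_iff_eq] <;> simp_all
    · have hadd : PySem.Set.add s c = s ++ [c] := by
        simp [PySem.Set.add, PySem.Set.contains, h]
      rw [hadd]
      simp only [List.cons_append, List.nil_append, List.filter_cons, List.filter_filter]
      have hcc : (!(s.contains c)) = true := by simp [h]
      simp only [hcc, if_pos, List.append_assoc, List.cons_append, List.nil_append, reduceIte]
      congr 1
      congr 1
      rw [List.filter_congr]
      intro x hx
      simp only [List.contains_append, List.contains_cons, List.contains_nil, Bool.or_false]
      cases hxs : s.contains x <;> cases hxc : (x == c) <;> simp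

theorem pvDedup_cons (c : String) (l : List String) :
    PySem.List.dedup (c :: l) = c :: (PySem.List.dedup l).filter (fun x => !(x == c)) := by
  show PySem.Set.ofList (c :: l) = _
  have h1 : PySem.Set.ofList (c :: l) = List.foldl PySem.Set.add [c] l := by
    have : PySem.Set.add PySem.Set.empty c = [c] := by
      simp [PySem.Set.add, PySem.Set.contains, PySem.Set.empty]
    simp [PySem.Set.ofList, this]
  rw [h1, pvOfList_from]
  simp only [List.cons_append, List.nil_append, PySem.List.dedup]
  congr 1
  apply List.filter_congr
  intro x hx
  simp [List.contains_cons, BEq.comm]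
  rw [show (c == x) = decide (c = x) from by cases h : (c == x) <;> simp_all [beq_iff_eq]]
  by_cases h : x = c
  · simp [h]
  · have : ¬ c = x := fun hh => h hh.symm
    simp [h, this]

theorem pvDedup_append_singleton (l : List String) (x : String) :
    PySem.List.dedup (l ++ [x]) =
      if x ∈ l then PySem.List.dedup l else PySem.List.dedup l ++ [x] := by
  have h1 : PySem.List.dedup (l ++ [x]) = PySem.Set.add (PySem.List.dedup l) x := by
    simp [PySem.List.dedup, PySem.Set.ofList, List.foldl_append]
  rw [h1]
  by_cases h : x ∈ l
  · rw [if_pos h]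
    have : PySem.Set.contains (PySem.List.dedup l) x = true := by
      simp only [PySem.Set.contains, List.contains_eq_mem, decide_eq_true_eq]
      exact (PySem.Set.mem_ofList l x).mpr h
    simp only [PySem.Set.add, this, if_true]
  · rw [if_neg h]
    have : PySem.Set.contains (PySem.List.dedup l) x = false := by
      simp only [PySem.Set.contains, List.contains_eq_mem, decide_eq_false_iff_not]
      exact fun hh => h ((PySem.Set.mem_ofList l x).mp hh)
    simp only [PySem.Set.add, this, Bool.false_eq_true, if_false]

theorem pvDedup_sublist (l : List String) : (PySem.List.dedup l).Sublist l := by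
  induction l with
  | nil => simp [PySem.List.dedup, PySem.Set.ofList]
  | cons c rest ih =>
    rw [pvDedup_cons]
    exact List.Sublist.cons₂ c ((List.filter_sublist).trans ih)

theorem pvDedup_nodup_self (l : List String) (h : l.Nodup) : PySem.List.dedup l = l := by
  induction l with
  | nil => rfl
  | cons c rest ih =>
    rw [pvDedup_cons, ih (List.nodup_cons.mp h).2]
    have : rest.filter (fun x => !(x == c)) = rest := by
      apply List.filter_eq_self.mpr
      intro x hx
      have : x ≠ c := fun he => (List.nodup_cons.mp h).1 (he ▸ hx)
      simp [this]
    rw [this]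

theorem pvDedup_filter (p : String → Bool) (l : List String) :
    (PySem.List.dedup l).filter p = PySem.List.dedup (l.filter p) := by
  induction l with
  | nil => rfl
  | cons c rest ih =>
    rw [pvDedup_cons, List.filter_cons]
    by_cases hp : p c
    · simp only [hp, if_pos, List.filter_cons, reduceIte]
      rw [pvDedup_cons, ← ih, List.filter_filter, List.filter_filter]
      congr 1
      apply List.filter_congr
      intro x hx
      exact Bool.and_comm _ _
    · simp only [hp, Bool.false_eq_true, if_false, List.filter_cons, reduceIte]
      rw [← ih, List.filter_filter]
      apply List.filter_congr
      intro x hx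
      by_cases hxp : p x
      · have : x ≠ c := fun he => hp (he ▸ hxp)
        simp [hxp, this]
      · simp [hxp]

theorem pvInsertBy_nil (before : String → String → Bool) (x : String) :
    PySem.List.insertBy before x [] = [x] := rfl

theorem pvInsertBy_cons (before : String → String → Bool) (x y : String) (ys : List String) :
    PySem.List.insertBy before x (y :: ys) =
      if before x y then x :: y :: ys else y :: PySem.List.insertBy before x ys := by
  rfl

def pvQ (before : String → String → Bool) (r : String → Nat) (a b : String) : Prop :=
  before a b = true ∨ (before a b = false ∧ before b a = false ∧ r a < r b)

theorem pvInsertBy_stable (before : String → String → Bool)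
    (Hasym : ∀ a b, before a b = true → before b a = false)
    (Hwk : ∀ x y z, before x y = true → before z y = false → before x z = true)
    (r : String → Nat) (x : String) (acc : List String)
    (hacc : acc.Pairwise (pvQ before r)) (hr : ∀ y ∈ acc, r y < r x) :
    (PySem.List.insertBy before x acc).Pairwise (pvQ before r) := by
  induction acc with
  | nil => simp [pvInsertBy_nil]
  | cons y ys ih =>
    have hQy : ∀ z ∈ ys, pvQ before r y z := (List.pairwise_cons.mp hacc).1
    have hys : ys.Pairwise (pvQ before r) := (List.pairwise_cons.mp hacc).2
    rw [pvInsertBy_cons]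
    by_cases hxy : before x y = true
    · rw [if_pos hxy]
      apply List.pairwise_cons.mpr
      refine ⟨?_, hacc⟩
      intro z hz
      rcases List.mem_cons.mp hz with h | h
      · subst h; exact Or.inl hxy
      · rcases hQy z h with hq | ⟨h1, h2, h3⟩
        · exact Or.inl (Hwk x y z hxy (Hasym y z hq))
        · exact Or.inl (Hwk x y z hxy h2)
    · rw [if_neg hxy]
      apply List.pairwise_cons.mpr
      refine ⟨?_, ih hys (fun z hz => hr z (List.mem_cons_of_mem y hz))⟩
      intro z hz
      rcases (PySem.List.mem_insertBy before x z ys).mp hz with h | h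
      · rw [h]
        by_cases hyx : before y x = true
        · exact Or.inl hyx
        · exact Or.inr ⟨(Bool.not_eq_true _).mp hyx, (Bool.not_eq_true _).mp hxy,
            hr y (List.mem_cons_self)⟩
      · exact hQy z h

theorem pvFoldl_insertBy_stable (before : String → String → Bool)
    (Hasym : ∀ a b, before a b = true → before b a = false)
    (Hwk : ∀ x y z, before x y = true → before z y = false → before x z = true)
    (r : String → Nat) (l : List String) :
    ∀ (acc : List String), acc.Pairwise (pvQ before r) →
      (∀ y ∈ acc, ∀ x ∈ l, r y < r x) → l.Pairwise (fun a b => r a < r b) →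
      (l.foldl (fun acc x => PySem.List.insertBy before x acc) acc).Pairwise (pvQ before r) := by
  induction l with
  | nil => intro acc h _ _; exact h
  | cons c rest ih =>
    intro acc hacc hcross hl
    rw [List.foldl_cons]
    apply ih
    · exact pvInsertBy_stable before Hasym Hwk r c acc hacc
        (fun y hy => hcross y hy c (List.mem_cons_self))
    · intro y hy x hx
      rcases (PySem.List.mem_insertBy before c y acc).mp hy with h | h
      · subst h; exact (List.pairwise_cons.mp hl).1 x hx
      · exact hcross y h x (List.mem_cons_of_mem c hx)
    · exact (List.pairwise_cons.mp hl).2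

theorem pvNodup_pairwise_idxOf (l : List String) (h : l.Nodup) :
    l.Pairwise (fun a b => l.idxOf a < l.idxOf b) := by
  rw [List.pairwise_iff_getElem]
  intro i j hi hj hij
  rw [List.Nodup.idxOf_getElem h i hi, List.Nodup.idxOf_getElem h j hj]
  exact hij

theorem pvRel_of_idxOf_lt (R : String → String → Prop) (l : List String) (hl : l.Pairwise R)
    (a b : String) (ha : a ∈ l) (hb : b ∈ l) (hab : l.idxOf a < l.idxOf b) : R a b := by
  have hia : l.idxOf a < l.length := List.idxOf_lt_length_of_mem ha
  have hib : l.idxOf b < l.length := List.idxOf_lt_length_of_mem hb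
  have := (List.pairwise_iff_getElem.mp hl) (l.idxOf a) (l.idxOf b) hia hib hab
  rwa [List.getElem_idxOf hia, List.getElem_idxOf hib] at this

def pvK1 (lo : String) (c : String) : Int := PySem.Str.find lo (PySem.Str.lower c)
def pvK2 (c : String) : Int := -(PySem.Str.len c : Int)
def pvMatched (lo : String) (c : String) : Bool := PySem.Str.isIn (PySem.Str.lower c) lo
def pvD (lo : String) (candidates : List String) : List String :=
  PySem.List.dedup (candidates.filter (pvMatched lo))

theorem pvLoopA (lo : String) (l : List String) : ∀ (h : List String),
    (l.foldl
      (fun (st : List String × PySem.Set String) cand =>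
        if PySem.Str.isIn (PySem.Str.lower cand) lo && !(PySem.Set.contains st.2 cand)
        then (st.1 ++ [cand], PySem.Set.add st.2 cand) else st)
      (h, h)).1 =
    h ++ (PySem.List.dedup (l.filter (pvMatched lo))).filter (fun c => !(h.contains c)) := by
  induction l with
  | nil => intro h; simp
  | cons c rest ih =>
    intro h
    rw [List.foldl_cons, List.filter_cons]
    by_cases hm : pvMatched lo c
    · by_cases hc : c ∈ h
      · have h2 : PySem.Set.contains (h : PySem.Set String) c = true := by
          simp [PySem.Set.contains, List.contains_eq_mem, hc]
        simp only [pvMatched] at hm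
        simp only [hm, h2, Bool.not_true, Bool.and_false, Bool.false_eq_true, if_false, reduceIte]
        rw [ih h]
        simp only [pvMatched, hm, if_pos, reduceIte]
        rw [pvDedup_cons]
        congr 1
        rw [List.filter_cons]
        have : (!(h.contains c)) = false := by simp [List.contains_eq_mem, hc]
        simp only [this, Bool.false_eq_true, if_false, List.filter_filter, reduceIte]
        apply List.filter_congr
        intro x hx
        cases hxc : (x == c)
        · simp
        · have : x = c := by simpa [beq_iff_eq] using hxc
          subst this
          simp [List.contains_eq_mem, hc]
      · have h2 : PySem.Set.contains (h : PySem.Set String) c = false := by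
          simp [PySem.Set.contains, List.contains_eq_mem, hc]
        simp only [pvMatched] at hm
        simp only [hm, h2, Bool.not_false, Bool.and_true, if_pos, reduceIte]
        have hadd : PySem.Set.add (h : PySem.Set String) c = h ++ [c] := by
          simp only [PySem.Set.add, h2, Bool.false_eq_true, if_false, reduceIte]
        rw [hadd, ih (h ++ [c])]
        simp only [pvMatched, hm, if_pos, reduceIte]
        rw [pvDedup_cons, List.filter_cons]
        have : (!(h.contains c)) = true := by simp [List.contains_eq_mem, hc]
        simp only [this, if_pos, List.append_assoc, List.cons_append, List.nil_append, reduceIte]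
        congr 2
        rw [List.filter_filter]
        apply List.filter_congr
        intro x hx
        simp only [List.contains_append, List.contains_cons, List.contains_nil, Bool.or_false,
          Bool.not_or, Bool.and_comm]
    · have hm' : pvMatched lo c = false := by simpa using hm
      simp only [pvMatched] at hm'
      simp only [hm', Bool.false_and, Bool.false_eq_true, if_false, reduceIte]
      rw [ih h]
      simp only [pvMatched, hm', Bool.false_eq_true, if_false, reduceIte]

theorem pvSorted_short (key : String → Int) (l : List String) (h : ¬ 1 < l.length) :
    PySem.List.sorted l key false = l := by
  match l, h with
  | [], _ => rfl
  | [x], _ => rfl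
  | x :: y :: t, h => exact absurd (by simp) h

def pvW (lo : String) (D : List String) (a b : String) : Prop :=
  pvK1 lo a < pvK1 lo b ∨ (pvK1 lo a = pvK1 lo b ∧
    (pvK2 a < pvK2 b ∨ (pvK2 a = pvK2 b ∧ D.idxOf a < D.idxOf b)))

-- helper facts about sorting used on both sides
theorem pvSorted_append_singleton (key : String → Int) (xs : List String) (x : String) :
    PySem.List.sorted (xs ++ [x]) key false =
      PySem.List.insertBy (fun a b => decide (key a < key b)) x (PySem.List.sorted xs key false) := by
  rw [PySem.List.sorted_eq_foldl_insertBy, PySem.List.sorted_eq_foldl_insertBy, List.foldl_append]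
  rfl

theorem pvInsertBy_all_before (before : String → String → Bool) (x : String) (l : List String)
    (h : ∀ z ∈ l, before x z = true) :
    PySem.List.insertBy before x l = x :: l := by
  cases l with
  | nil => rfl
  | cons y ys => rw [pvInsertBy_cons, if_pos (h y (by simp))]

theorem pvFilter_insertBy (key : String → Int) (x : String) (l : List String)
    (hl : l.Pairwise (fun a b => key a ≤ key b)) (p : String → Bool) :
    (PySem.List.insertBy (fun a b => decide (key a < key b)) x l).filter p =
      if p x then PySem.List.insertBy (fun a b => decide (key a < key b)) x (l.filter p)
      else l.filter p := by
  induction l with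
  | nil =>
    by_cases hp : p x <;> simp [hp, pvInsertBy_nil]
  | cons y ys ih =>
    have hy : ∀ z ∈ ys, key y ≤ key z := fun z hz => (List.pairwise_cons.mp hl).1 z hz
    have hys : ys.Pairwise (fun a b => key a ≤ key b) := (List.pairwise_cons.mp hl).2
    rw [pvInsertBy_cons]
    by_cases hxy : key x < key y
    · rw [if_pos (by simpa using hxy)]
      by_cases hp : p x
      · rw [if_pos hp]
        have hall : ∀ z ∈ (y :: ys).filter p, decide (key x < key z) = true := by
          intro z hz
          have hz' := List.mem_of_mem_filter hz
          rcases List.mem_cons.mp hz' with h | h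
          · subst h; simpa using hxy
          · simpa using lt_of_lt_of_le hxy (hy z h)
        rw [pvInsertBy_all_before _ _ _ hall, List.filter_cons, if_pos hp]
      · rw [if_neg hp, List.filter_cons, if_neg hp]
    · rw [if_neg (by simpa using hxy)]
      rw [List.filter_cons]
      by_cases hp : p x
      · rw [if_pos hp]
        by_cases hpy : p y
        · simp only [hpy, if_pos, List.filter_cons, reduceIte]
          rw [pvInsertBy_cons, if_neg (by simpa using hxy), ih hys, if_pos hp]
        · simp only [hpy, Bool.false_eq_true, if_false, List.filter_cons, reduceIte]
          rw [ih hys, if_pos hp]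
      · rw [if_neg hp]
        by_cases hpy : p y
        · simp only [hpy, if_pos, reduceIte]
          rw [ih hys, if_neg hp]
          simp [List.filter_cons, hpy]
        · simp only [hpy, Bool.false_eq_true, if_false, reduceIte]
          rw [ih hys, if_neg hp]
          simp [List.filter_cons, hpy]

theorem pvDedup_insertBy (key : String → Int) (x : String) (l : List String)
    (hl : l.Pairwise (fun a b => key a ≤ key b)) :
    PySem.List.dedup (PySem.List.insertBy (fun a b => decide (key a < key b)) x l) =
      if x ∈ l then PySem.List.dedup l
      else PySem.List.insertBy (fun a b => decide (key a < key b)) x (PySem.List.dedup l) := by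
  induction l with
  | nil =>
    simp only [pvInsertBy_nil, List.not_mem_nil, if_false, reduceIte]
    rw [pvDedup_cons]
    simp [PySem.List.dedup, PySem.Set.ofList, PySem.Set.empty, pvInsertBy_nil]
  | cons y ys ih =>
    have hy : ∀ z ∈ ys, key y ≤ key z := fun z hz => (List.pairwise_cons.mp hl).1 z hz
    have hys : ys.Pairwise (fun a b => key a ≤ key b) := (List.pairwise_cons.mp hl).2
    have hdys : (PySem.List.dedup ys).Pairwise (fun a b => key a ≤ key b) :=
      List.Pairwise.sublist (pvDedup_sublist ys) hys
    rw [pvInsertBy_cons]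
    by_cases hxy : key x < key y
    · rw [if_pos (by simpa using hxy)]
      have hnx : x ∉ y :: ys := by
        intro hmem
        rcases List.mem_cons.mp hmem with h | h
        · exact absurd hxy (by rw [h]; exact lt_irrefl _)
        · exact absurd hxy (not_lt.mpr (hy x h))
      rw [if_neg hnx, pvDedup_cons]
      have hfix : (PySem.List.dedup (y :: ys)).filter (fun z => !(z == x)) = PySem.List.dedup (y :: ys) := by
        apply List.filter_eq_self.mpr
        intro z hz
        have : z ∈ y :: ys := (pvDedup_sublist _).subset hz
        simp only [Bool.not_eq_eq_eq_not, Bool.not_true, beq_eq_false_iff_ne, ne_eq]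
        exact fun he => hnx (he ▸ this)
      rw [hfix]
      rw [pvInsertBy_all_before]
      intro z hz
      have hz' : z ∈ y :: ys := (pvDedup_sublist _).subset hz
      rcases List.mem_cons.mp hz' with h | h
      · subst h; simpa using hxy
      · simpa using lt_of_lt_of_le hxy (hy z h)
    · rw [if_neg (by simpa using hxy)]
      rw [pvDedup_cons, pvDedup_cons, ih hys]
      by_cases hmem : x ∈ ys
      · rw [if_pos hmem, if_pos (List.mem_cons_of_mem y hmem)]
      · rw [if_neg hmem]
        by_cases hxyeq : x = y
        · subst hxyeq
          rw [if_pos (List.mem_cons_self)]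
          congr 1
          rw [pvFilter_insertBy key x (PySem.List.dedup ys) hdys]
          simp
        · have : x ∉ y :: ys := by
            intro hmem2
            rcases List.mem_cons.mp hmem2 with h | h
            · exact hxyeq h
            · exact hmem h
          rw [if_neg this, pvInsertBy_cons, if_neg (by simpa using hxy)]
          congr 1
          rw [pvFilter_insertBy key x (PySem.List.dedup ys) hdys]
          rw [if_pos (by simp [hxyeq])]

theorem pvFilter_sorted (key : String → Int) (p : String → Bool) (xs : List String) :
    (PySem.List.sorted xs key false).filter p = PySem.List.sorted (xs.filter p) key false := by
  induction xs using List.reverseRecOn with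
  | nil => rfl
  | append_singleton xs x ih =>
    rw [pvSorted_append_singleton, List.filter_append, List.filter_cons]
    rw [pvFilter_insertBy key x _ (PySem.List.sorted_pairwise xs key) p, ih]
    by_cases hp : p x
    · rw [if_pos hp]
      simp only [hp, if_pos, List.filter_nil, reduceIte]
      rw [pvSorted_append_singleton]
    · rw [if_neg hp]
      simp [hp]

theorem pvDedup_sorted (key : String → Int) (xs : List String) :
    PySem.List.dedup (PySem.List.sorted xs key false) =
      PySem.List.sorted (PySem.List.dedup xs) key false := by
  induction xs using List.reverseRecOn with
  | nil => rfl
  | append_singleton xs x ih =>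
    rw [pvSorted_append_singleton, pvDedup_insertBy key x _ (PySem.List.sorted_pairwise xs key),
      pvDedup_append_singleton, ih]
    by_cases h : x ∈ xs
    · rw [if_pos ((PySem.List.mem_sorted xs key false x).mpr h), if_pos h]
    · rw [if_neg (fun hh => h ((PySem.List.mem_sorted xs key false x).mp hh)), if_neg h,
        pvSorted_append_singleton]

-- A-side: the double sort is pairwise-ordered by the strict lexicographic relation pvW
theorem pvHasymK (k : String → Int) : ∀ a b : String,
    (fun a b => decide (k a < k b)) a b = true → (fun a b => decide (k a < k b)) b a = false := by
  intro a b h; simp only [decide_eq_true_eq] at h; simp only [decide_eq_false_iff_not]; omega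

theorem pvHwkK (k : String → Int) : ∀ x y z : String,
    (fun a b => decide (k a < k b)) x y = true → (fun a b => decide (k a < k b)) z y = false →
    (fun a b => decide (k a < k b)) x z = true := by
  intro x y z h1 h2
  simp only [decide_eq_true_eq] at h1 ⊢; simp only [decide_eq_false_iff_not] at h2; omega

theorem pvA_pairwise (lo : String) (D : List String) (hD : D.Nodup) :
    (PySem.List.sorted (PySem.List.sorted D pvK2 false) (pvK1 lo) false).Pairwise (pvW lo D) := by
  have hpermL2 : (PySem.List.sorted D pvK2 false).Perm D := PySem.List.sorted_perm D pvK2 false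
  have hndL2 : (PySem.List.sorted D pvK2 false).Nodup := hpermL2.nodup_iff.mpr hD
  have hQ2 : (PySem.List.sorted D pvK2 false).Pairwise
      (pvQ (fun a b => decide (pvK2 a < pvK2 b)) (fun c => D.idxOf c)) := by
    have h := pvFoldl_insertBy_stable (fun a b => decide (pvK2 a < pvK2 b)) (pvHasymK pvK2)
      (pvHwkK pvK2) (fun c => D.idxOf c) D [] List.Pairwise.nil (by simp)
      (pvNodup_pairwise_idxOf D hD)
    rwa [← PySem.List.sorted_eq_foldl_insertBy] at h
  have hQA : (PySem.List.sorted (PySem.List.sorted D pvK2 false) (pvK1 lo) false).Pairwise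
      (pvQ (fun a b => decide (pvK1 lo a < pvK1 lo b))
        (fun c => (PySem.List.sorted D pvK2 false).idxOf c)) := by
    have h := pvFoldl_insertBy_stable (fun a b => decide (pvK1 lo a < pvK1 lo b)) (pvHasymK _)
      (pvHwkK _) (fun c => (PySem.List.sorted D pvK2 false).idxOf c)
      (PySem.List.sorted D pvK2 false) [] List.Pairwise.nil (by simp)
      (pvNodup_pairwise_idxOf _ hndL2)
    rwa [← PySem.List.sorted_eq_foldl_insertBy] at h
  apply List.Pairwise.imp_of_mem _ hQA
  intro a b ha hb hq
  have haL2 : a ∈ PySem.List.sorted D pvK2 false := (PySem.List.mem_sorted _ _ _ _).mp ha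
  have hbL2 : b ∈ PySem.List.sorted D pvK2 false := (PySem.List.mem_sorted _ _ _ _).mp hb
  rcases hq with h | ⟨h1, h2, h3⟩
  · exact Or.inl (by simpa using h)
  · have hk1eq : pvK1 lo a = pvK1 lo b := by
      simp only [decide_eq_false_iff_not] at h1 h2; omega
    have hq2 := pvRel_of_idxOf_lt _ _ hQ2 a b haL2 hbL2 h3
    rcases hq2 with h | ⟨g1, g2, g3⟩
    · exact Or.inr ⟨hk1eq, Or.inl (by simpa using h)⟩
    · have : pvK2 a = pvK2 b := by
        simp only [decide_eq_false_iff_not] at g1 g2; omega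
      exact Or.inr ⟨hk1eq, Or.inr ⟨this, g3⟩⟩

-- first-occurrence characterisation of Python's find
theorem pvFind_prefix (s sub : List Char) (h : 0 ≤ PySem.Chars.find s sub) :
    sub <+: s.drop (PySem.Chars.find s sub).toNat ∧
      ∀ j, j < (PySem.Chars.find s sub).toNat → ¬ sub <+: s.drop j := by
  have hne : PySem.Chars.findFrom s sub ((0 : Nat) : Int) ≠ -1 := by
    simp only [Nat.cast_zero, PySem.Chars.findFrom_zero]
    omega
  have hspec := PySem.Chars.findFrom_natCast_spec s sub 0 (Nat.zero_le _) hne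
  simp only [Nat.cast_zero, PySem.Chars.findFrom_zero] at hspec
  exact ⟨hspec.2.1, fun j hj => hspec.2.2 j (Nat.zero_le _) hj⟩

theorem pvFind_le (s sub : List Char) (j : Nat) (h : sub <+: s.drop j) :
    0 ≤ PySem.Chars.find s sub ∧ (PySem.Chars.find s sub).toNat ≤ j := by
  have hin : PySem.Chars.isIn sub s = true :=
    (PySem.Chars.exists_prefix_drop_iff_isIn sub s).mp ⟨j, h⟩
  have h0 : 0 ≤ PySem.Chars.find s sub :=
    (PySem.Chars.find_nonneg_iff s sub).mpr ((PySem.Chars.isIn_iff_infix sub s).mp hin)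
  refine ⟨h0, ?_⟩
  by_contra hlt
  exact (pvFind_prefix s sub h0).2 j (by omega) h

-- the dedup-with-pairing loop of B
theorem pvPats (f : String → String × String) (l : List String) : ∀ (s : List String),
    l.foldl
      (fun (st : List (String × String) × PySem.Set String) c =>
        if !(PySem.Set.contains st.2 c) then (st.1 ++ [f c], PySem.Set.add st.2 c) else st)
      (s.map f, s)
    = ((List.foldl PySem.Set.add s l).map f, List.foldl PySem.Set.add s l) := by
  induction l with
  | nil => intro s; rfl
  | cons c rest ih =>
    intro s
    rw [List.foldl_cons, List.foldl_cons]
    by_cases h : c ∈ s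
    · have h2 : PySem.Set.contains (s : PySem.Set String) c = true := by
        simpa [PySem.Set.contains, List.contains_eq_mem] using h
      have hadd : PySem.Set.add (s : PySem.Set String) c = s := by
        simp only [PySem.Set.add, h2, reduceIte]
      simp only [h2, Bool.not_true, Bool.false_eq_true, if_false, hadd, reduceIte]
      exact ih s
    · have h2 : PySem.Set.contains (s : PySem.Set String) c = false := by
        simpa [PySem.Set.contains, List.contains_eq_mem] using h
      have hadd : PySem.Set.add (s : PySem.Set String) c = s ++ [c] := by
        simp only [PySem.Set.add, h2, Bool.false_eq_true, reduceIte]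
      simp only [h2, Bool.not_false, if_pos, hadd, reduceIte]
      have : (s.map f) ++ [f c] = (s ++ [c]).map f := by simp
      rw [this]
      exact ih (s ++ [c])

-- relative order inside a filtered list follows the relative order in the whole list
theorem pvIdx_lt_transfer (Dall : List String) (hnd : Dall.Nodup) (p : String → Bool)
    (a b : String) (ha : a ∈ Dall.filter p) (hb : b ∈ Dall.filter p)
    (hlt : Dall.idxOf a < Dall.idxOf b) : (Dall.filter p).idxOf a < (Dall.filter p).idxOf b := by
  have hPW : (Dall.filter p).Pairwise (fun a b => Dall.idxOf a < Dall.idxOf b) :=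
    List.Pairwise.sublist List.filter_sublist (pvNodup_pairwise_idxOf Dall hnd)
  rcases Nat.lt_trichotomy ((Dall.filter p).idxOf a) ((Dall.filter p).idxOf b) with h | h | h
  · exact h
  · exfalso
    have : a = b := (List.idxOf_inj ha).mp h
    subst this
    omega
  · have := pvRel_of_idxOf_lt _ _ hPW b a hb ha h
    omega

-- one step of B's scan
theorem pvScanStep (lo : String) (Dall : List String) (hnd : Dall.Nodup) (n : Nat)
    (h : List String)
    (hPW : h.Pairwise (pvW lo (Dall.filter (pvMatched lo))))
    (hND : h.Nodup)
    (hMem : ∀ c, c ∈ h ↔ c ∈ Dall ∧ pvMatched lo c = true ∧ (pvK1 lo c).toNat < n) :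
    ∃ h' : List String,
      (if ((Dall.map (fun c => (c, PySem.Str.lower c))).filter
            (fun p => !(PySem.Set.contains (h : PySem.Set String) p.1)
              && PySem.Chars.startswith (lo.toList.drop ((n : Int)).toNat) p.2.toList)).map
            (fun p => p.1) ≠ [] then
         (h ++ PySem.List.sorted (((Dall.map (fun c => (c, PySem.Str.lower c))).filter
              (fun p => !(PySem.Set.contains (h : PySem.Set String) p.1)
                && PySem.Chars.startswith (lo.toList.drop ((n : Int)).toNat) p.2.toList)).map
              (fun p => p.1)) (fun c => -(PySem.Str.len c : Int)) false,
          (PySem.List.sorted (((Dall.map (fun c => (c, PySem.Str.lower c))).filter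
              (fun p => !(PySem.Set.contains (h : PySem.Set String) p.1)
                && PySem.Chars.startswith (lo.toList.drop ((n : Int)).toNat) p.2.toList)).map
              (fun p => p.1)) (fun c => -(PySem.Str.len c : Int)) false).foldl
            PySem.Set.add (h : PySem.Set String))
       else (h, (h : PySem.Set String))) = (h', (h' : PySem.Set String)) ∧
      h'.Pairwise (pvW lo (Dall.filter (pvMatched lo))) ∧ h'.Nodup ∧
      (∀ c, c ∈ h' ↔ c ∈ Dall ∧ pvMatched lo c = true ∧ (pvK1 lo c).toNat < n + 1) := by
  have htn : ((n : Int)).toNat = n := Int.toNat_natCast n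
  -- the group is exactly the candidates whose first occurrence is at position n
  have hgrp : ((Dall.map (fun c => (c, PySem.Str.lower c))).filter
      (fun p => !(PySem.Set.contains (h : PySem.Set String) p.1)
        && PySem.Chars.startswith (lo.toList.drop ((n : Int)).toNat) p.2.toList)).map
      (fun p => p.1)
      = Dall.filter (fun c => pvMatched lo c && decide ((pvK1 lo c).toNat = n)) := by
    rw [htn, List.filter_map, List.map_map]
    have hid : ((fun p : String × String => p.1) ∘ (fun c => (c, PySem.Str.lower c))) = id := rfl
    rw [hid, List.map_id]
    apply List.filter_congr
    intro c hc
    simp only [Function.comp]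
    have hk1 : pvK1 lo c = PySem.Chars.find lo.toList (PySem.Str.lower c).toList := by
      simp [pvK1, PySem.Str.find_eq]
    have hm : pvMatched lo c = PySem.Chars.isIn (PySem.Str.lower c).toList lo.toList := by
      simp [pvMatched, PySem.Str.isIn_eq]
    have hlow : (PySem.Str.lower c).toList = PySem.Chars.lower c.toList :=
      PySem.Str.toList_lower c
    by_cases hs : PySem.Chars.startswith (lo.toList.drop n) (PySem.Str.lower c).toList = true
    · have hpre : (PySem.Str.lower c).toList <+: lo.toList.drop n :=
        (PySem.Chars.startswith_iff _ _).mp hs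
      have hle := pvFind_le lo.toList (PySem.Str.lower c).toList n hpre
      have hmt : pvMatched lo c = true := by
        rw [hm]
        exact (PySem.Chars.exists_prefix_drop_iff_isIn _ _).mp ⟨n, hpre⟩
      have hmemiff := hMem c
      by_cases hpos : (pvK1 lo c).toNat < n
      · have hch : c ∈ h := hmemiff.mpr ⟨hc, hmt, hpos⟩
        have hcont : PySem.Set.contains (h : PySem.Set String) c = true := by
          simp [PySem.Set.contains, List.contains_eq_mem, hch]
        have hne : ¬ ((pvK1 lo c).toNat = n) := by omega
        simp [hch, hmt, hne]
      · have hch : c ∉ h := fun hh => hpos (hmemiff.mp hh).2.2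
        have hcont : PySem.Set.contains (h : PySem.Set String) c = false := by
          simp [PySem.Set.contains, List.contains_eq_mem, hch]
        have heq : (pvK1 lo c).toNat = n := by
          rw [hk1] at hpos ⊢
          omega
        have hsC := hs
        rw [hlow] at hsC
        simp [hch, hmt, heq, hsC]
    · have hs' : PySem.Chars.startswith (lo.toList.drop n) (PySem.Str.lower c).toList = false :=
        by simpa using hs
      by_cases hmt : pvMatched lo c = true
      · by_cases heq : (pvK1 lo c).toNat = n
        · exfalso
          have h0 : 0 ≤ PySem.Chars.find lo.toList (PySem.Str.lower c).toList := by
            rw [hm] at hmt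
            exact (PySem.Chars.find_nonneg_iff _ _).mpr
              ((PySem.Chars.isIn_iff_infix _ _).mp hmt)
          have hpre := (pvFind_prefix lo.toList (PySem.Str.lower c).toList h0).1
          rw [hk1] at heq
          rw [heq] at hpre
          exact hs ((PySem.Chars.startswith_iff _ _).mpr hpre)
        · have hsC := hs'
          rw [hlow] at hsC
          simp [hmt, heq, hsC]
      · have hmf : pvMatched lo c = false := by simpa using hmt
        have hsC := hs'
        rw [hlow] at hsC
        simp [hmf, hsC]
  rw [hgrp]
  set G := Dall.filter (fun c => pvMatched lo c && decide ((pvK1 lo c).toNat = n)) with hG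
  have hGmem : ∀ c, c ∈ G ↔ c ∈ Dall ∧ pvMatched lo c = true ∧ (pvK1 lo c).toNat = n := by
    intro c
    rw [hG, List.mem_filter]
    simp only [Bool.and_eq_true, decide_eq_true_eq]
  by_cases hg : G = []
  · refine ⟨h, ?_, hPW, hND, ?_⟩
    · rw [if_neg (show ¬ (G ≠ []) from fun k => k hg)]
    · intro c
      rw [hMem c]
      constructor
      · rintro ⟨h1, h2, h3⟩; exact ⟨h1, h2, by omega⟩
      · rintro ⟨h1, h2, h3⟩
        refine ⟨h1, h2, ?_⟩
        have : ¬ ((pvK1 lo c).toNat = n) := by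
          intro he
          have : c ∈ G := (hGmem c).mpr ⟨h1, h2, he⟩
          rw [hg] at this
          cases this
        omega
  · have hGnd : G.Nodup := hnd.filter _
    set sg := PySem.List.sorted G (fun c => -(PySem.Str.len c : Int)) false with hsg
    have hsgperm : sg.Perm G := PySem.List.sorted_perm G _ false
    have hsgnd : sg.Nodup := hsgperm.nodup_iff.mpr hGnd
    have hsgmem : ∀ c, c ∈ sg ↔ c ∈ G := fun c => PySem.List.mem_sorted G _ false c
    have hdisj : ∀ c ∈ sg, c ∉ h := by
      intro c hcs hch
      have h1 := (hGmem c).mp ((hsgmem c).mp hcs)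
      have h2 := (hMem c).mp hch
      omega
    have hset : sg.foldl PySem.Set.add (h : PySem.Set String) = h ++ sg := by
      rw [pvOfList_from sg h]
      congr 1
      rw [← PySem.List.dedup_eq_ofList, pvDedup_nodup_self sg hsgnd]
      apply List.filter_eq_self.mpr
      intro x hx
      simp [List.contains_eq_mem, hdisj x hx]
    refine ⟨h ++ sg, ?_, ?_, ?_, ?_⟩
    · rw [if_pos hg, hset]
    · -- pairwise pvW on h ++ sg
      rw [List.pairwise_append]
      refine ⟨hPW, ?_, ?_⟩
      · -- inside the sorted group: length-descending, ties in original candidate order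
        have hGpw : G.Pairwise (fun a b => Dall.idxOf a < Dall.idxOf b) :=
          List.Pairwise.sublist List.filter_sublist (pvNodup_pairwise_idxOf Dall hnd)
        have hQ : sg.Pairwise (pvQ (fun a b => decide (pvK2 a < pvK2 b))
            (fun c => Dall.idxOf c)) := by
          have hh := pvFoldl_insertBy_stable (fun a b => decide (pvK2 a < pvK2 b))
            (pvHasymK pvK2) (pvHwkK pvK2) (fun c => Dall.idxOf c) G [] List.Pairwise.nil
            (by simp) hGpw
          rw [← PySem.List.sorted_eq_foldl_insertBy] at hh
          exact hh
        apply List.Pairwise.imp_of_mem _ hQ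
        intro a b ha hb hq
        have haG := (hsgmem a).mp ha
        have hbG := (hsgmem b).mp hb
        have haP := (hGmem a).mp haG
        have hbP := (hGmem b).mp hbG
        have hk1a : pvK1 lo a = (n : Int) := by
          have h0 : 0 ≤ pvK1 lo a := by
            simp only [pvK1, PySem.Str.find_eq]
            exact (PySem.Chars.find_nonneg_iff _ _).mpr
              ((PySem.Chars.isIn_iff_infix _ _).mp (by simpa [pvMatched, PySem.Str.isIn_eq] using haP.2.1))
          omega
        have hk1b : pvK1 lo b = (n : Int) := by
          have h0 : 0 ≤ pvK1 lo b := by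
            simp only [pvK1, PySem.Str.find_eq]
            exact (PySem.Chars.find_nonneg_iff _ _).mpr
              ((PySem.Chars.isIn_iff_infix _ _).mp (by simpa [pvMatched, PySem.Str.isIn_eq] using hbP.2.1))
          omega
        have hk1eq : pvK1 lo a = pvK1 lo b := by rw [hk1a, hk1b]
        rcases hq with hlt | ⟨h1, h2, h3⟩
        · exact Or.inr ⟨hk1eq, Or.inl (by simpa using hlt)⟩
        · have hk2eq : pvK2 a = pvK2 b := by
            simp only [decide_eq_false_iff_not] at h1 h2; omega
          have haD : a ∈ Dall.filter (pvMatched lo) := List.mem_filter.mpr ⟨haP.1, haP.2.1⟩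
          have hbD : b ∈ Dall.filter (pvMatched lo) := List.mem_filter.mpr ⟨hbP.1, hbP.2.1⟩
          exact Or.inr ⟨hk1eq, Or.inr ⟨hk2eq,
            pvIdx_lt_transfer Dall hnd (pvMatched lo) a b haD hbD h3⟩⟩
      · -- earlier hits come strictly before the new group
        intro a ha b hb
        have haP := (hMem a).mp ha
        have hbP := (hGmem b).mp ((hsgmem b).mp hb)
        have h0a : 0 ≤ pvK1 lo a := by
          simp only [pvK1, PySem.Str.find_eq]
          exact (PySem.Chars.find_nonneg_iff _ _).mpr
            ((PySem.Chars.isIn_iff_infix _ _).mp (by simpa [pvMatched, PySem.Str.isIn_eq] using haP.2.1))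
        have h0b : 0 ≤ pvK1 lo b := by
          simp only [pvK1, PySem.Str.find_eq]
          exact (PySem.Chars.find_nonneg_iff _ _).mpr
            ((PySem.Chars.isIn_iff_infix _ _).mp (by simpa [pvMatched, PySem.Str.isIn_eq] using hbP.2.1))
        exact Or.inl (by omega)
    · rw [List.nodup_append]
      refine ⟨hND, hsgnd, ?_⟩
      intro a ha b hb he
      exact hdisj b hb (he ▸ ha)
    · intro c
      rw [List.mem_append, hMem c, hsgmem c, hGmem c]
      constructor
      · rintro (⟨h1, h2, h3⟩ | ⟨h1, h2, h3⟩) <;> exact ⟨h1, h2, by omega⟩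
      · rintro ⟨h1, h2, h3⟩
        by_cases he : (pvK1 lo c).toNat = n
        · exact Or.inr ⟨h1, h2, he⟩
        · exact Or.inl ⟨h1, h2, by omega⟩

-- the whole scan, by induction over the scanned positions (m is the position at which
-- the early exit froze the state, or n if it never fired)
theorem pvScanInv (lo : String) (Dall : List String) (hnd : Dall.Nodup) (n : Nat) :
    ∃ h : List String,
      (List.range n).foldl
        (fun (st : List String × PySem.Set String) (k : Nat) =>
          if 5 ≤ PySem.List.len st.1 then st
          else
            if ((Dall.map (fun c => (c, PySem.Str.lower c))).filter
                  (fun p => !(PySem.Set.contains st.2 p.1)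
                    && PySem.Chars.startswith (lo.toList.drop ((k : Int)).toNat) p.2.toList)).map
                  (fun p => p.1) ≠ [] then
              (st.1 ++ PySem.List.sorted (((Dall.map (fun c => (c, PySem.Str.lower c))).filter
                    (fun p => !(PySem.Set.contains st.2 p.1)
                      && PySem.Chars.startswith (lo.toList.drop ((k : Int)).toNat) p.2.toList)).map
                    (fun p => p.1)) (fun c => -(PySem.Str.len c : Int)) false,
               (PySem.List.sorted (((Dall.map (fun c => (c, PySem.Str.lower c))).filter
                    (fun p => !(PySem.Set.contains st.2 p.1)
                      && PySem.Chars.startswith (lo.toList.drop ((k : Int)).toNat) p.2.toList)).map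
                    (fun p => p.1)) (fun c => -(PySem.Str.len c : Int)) false).foldl
                 PySem.Set.add st.2)
            else st)
        ([], PySem.Set.empty)
      = (h, (h : PySem.Set String)) ∧
      h.Pairwise (pvW lo (Dall.filter (pvMatched lo))) ∧ h.Nodup ∧
      ∃ m : Nat, m ≤ n ∧
        (∀ c, c ∈ h ↔ c ∈ Dall ∧ pvMatched lo c = true ∧ (pvK1 lo c).toNat < m) ∧
        (m < n → 5 ≤ h.length) := by
  induction n with
  | zero =>
    refine ⟨[], rfl, List.Pairwise.nil, List.nodup_nil, 0, le_refl 0, ?_, by omega⟩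
    intro c; simp
  | succ m ih =>
    obtain ⟨h, hfold, hPW, hND, j, hj_le, hMem, hj_stop⟩ := ih
    by_cases hlen : (5 : Int) ≤ PySem.List.len h
    · refine ⟨h, ?_, hPW, hND, j, by omega, hMem, fun _ => ?_⟩
      · rw [List.range_succ, List.foldl_append, hfold, List.foldl_cons, List.foldl_nil]
        exact if_pos hlen
      · rw [PySem.List.len_eq] at hlen
        omega
    · have hj_eq : j = m := by
        rw [PySem.List.len_eq] at hlen
        by_cases hjm : j < m
        · exact absurd (hj_stop hjm) (by omega)
        · omega
      subst hj_eq
      obtain ⟨h', hstep, hPW', hND', hMem'⟩ := pvScanStep lo Dall hnd j h hPW hND hMem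
      refine ⟨h', ?_, hPW', hND', j + 1, le_refl _, hMem', by omega⟩
      rw [List.range_succ, List.foldl_append, hfold, List.foldl_cons, List.foldl_nil]
      exact (if_neg hlen).trans hstep

-- B's result before truncation: a pvW-ordered prefix of the matched distinct candidates,
-- complete unless the early exit already collected 5 hits
set_option maxHeartbeats 2000000 in
theorem pvB_char (text : String) (candidates : List String) :
    ∃ h rest : List String,
      detect_heroes_py_alt text candidates = PySem.List.slice h none (some 5) ∧
      (h ++ rest).Pairwise (pvW (PySem.Str.lower text) (pvD (PySem.Str.lower text) candidates)) ∧
      (h ++ rest).Perm (pvD (PySem.Str.lower text) candidates) ∧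
      (rest = [] ∨ 5 ≤ h.length) := by
  simp only [detect_heroes_py_alt]
  set lo := PySem.Str.lower text with hlo
  have hps1 : (candidates.foldl
      (fun (st : List (String × String) × PySem.Set String) c =>
        if !(PySem.Set.contains st.2 c) then
          (st.1 ++ [(c, PySem.Str.lower c)], PySem.Set.add st.2 c)
        else st)
      ([], PySem.Set.empty)).1
      = (PySem.List.dedup candidates).map (fun c => (c, PySem.Str.lower c)) := by
    have h0 : (([], PySem.Set.empty) : List (String × String) × PySem.Set String)
        = (([] : List String).map (fun c => (c, PySem.Str.lower c)), ([] : List String)) := rfl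
    rw [h0, pvPats (fun c => (c, PySem.Str.lower c)) candidates []]
    rfl
  rw [hps1]
  set Dall := PySem.List.dedup candidates with hDall
  have hnd : Dall.Nodup := PySem.List.nodup_dedup candidates
  have hDeq : Dall.filter (pvMatched lo) = pvD lo candidates := by
    rw [hDall, pvD, pvDedup_filter]
  have hrange : PySem.List.pyRange 0 (PySem.Str.len lo + 1) 1
      = (List.range (lo.toList.length + 1)).map (fun k : Nat => (k : Int)) := by
    rw [PySem.Str.len_eq]
    rw [show ((lo.toList.length : Int) + 1) = ((lo.toList.length + 1 : Nat) : Int) by push_cast; ring]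
    exact PySem.List.pyRange_zero_natCast (lo.toList.length + 1)
  rw [hrange, List.foldl_map]
  obtain ⟨h, hfold, hPW, hND, m, hm_le, hMem, hm_stop⟩ :=
    pvScanInv lo Dall hnd (lo.toList.length + 1)
  rw [hfold]
  -- the matched candidates B did not reach, in their final (A-side) order
  set D := pvD lo candidates with hD
  have hDnd : D.Nodup := by rw [hD, pvD]; exact PySem.List.nodup_dedup _
  set F := PySem.List.sorted (PySem.List.sorted D pvK2 false) (pvK1 lo) false with hF
  have hFperm : F.Perm D :=
    (PySem.List.sorted_perm _ (pvK1 lo) false).trans (PySem.List.sorted_perm D pvK2 false)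
  have hFnd : F.Nodup := hFperm.nodup_iff.mpr hDnd
  have hFpw : F.Pairwise (pvW lo D) := hF ▸ pvA_pairwise lo D hDnd
  have hmemD : ∀ c, c ∈ D ↔ c ∈ Dall ∧ pvMatched lo c = true := by
    intro c
    rw [← hDeq, List.mem_filter]
  have hposD : ∀ c ∈ D, (pvK1 lo c).toNat ≤ lo.toList.length := by
    intro c _
    have h3 : PySem.Chars.find lo.toList (PySem.Str.lower c).toList ≤ (lo.toList.length : Int) :=
      PySem.Chars.find_le_length lo.toList (PySem.Str.lower c).toList
    simp only [pvK1, PySem.Str.find_eq]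
    omega
  have hsubF : ∀ c ∈ h, c ∈ F := by
    intro c hc
    have h1 := (hMem c).mp hc
    rw [PySem.List.mem_sorted, PySem.List.mem_sorted, hmemD c]
    exact ⟨h1.1, h1.2.1⟩
  refine ⟨h, F.filter (fun c => !(h.contains c)), rfl, ?_, ?_, ?_⟩
  · -- pairwise on the recombined list
    rw [List.pairwise_append]
    refine ⟨by rwa [hDeq] at hPW, List.Pairwise.sublist List.filter_sublist hFpw, ?_⟩
    intro a ha b hb
    have haP := (hMem a).mp ha
    have hbF := List.mem_filter.mp hb
    have hbD : b ∈ D := by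
      have := hbF.1
      rwa [PySem.List.mem_sorted, PySem.List.mem_sorted] at this
    have hbh : b ∉ h := by
      have := hbF.2
      simp only [Bool.not_eq_eq_eq_not, Bool.not_true, List.contains_eq_mem,
        decide_eq_false_iff_not] at this
      exact this
    have hbP := (hmemD b).mp hbD
    have hbpos : ¬ ((pvK1 lo b).toNat < m) := fun hlt => hbh ((hMem b).mpr ⟨hbP.1, hbP.2, hlt⟩)
    have h0a : 0 ≤ pvK1 lo a := by
      simp only [pvK1, PySem.Str.find_eq]
      exact (PySem.Chars.find_nonneg_iff _ _).mpr
        ((PySem.Chars.isIn_iff_infix _ _).mp (by simpa [pvMatched, PySem.Str.isIn_eq] using haP.2.1))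
    have h0b : 0 ≤ pvK1 lo b := by
      simp only [pvK1, PySem.Str.find_eq]
      exact (PySem.Chars.find_nonneg_iff _ _).mpr
        ((PySem.Chars.isIn_iff_infix _ _).mp (by simpa [pvMatched, PySem.Str.isIn_eq] using hbP.2))
    exact Or.inl (by omega)
  · -- permutation with D
    have hfp : h.Perm (F.filter (fun c => h.contains c)) := by
      rw [List.perm_ext_iff_of_nodup hND (hFnd.filter _)]
      intro c
      rw [List.mem_filter]
      constructor
      · intro hc
        exact ⟨hsubF c hc, by simp [List.contains_eq_mem, hc]⟩
      · rintro ⟨-, hc⟩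
        simpa [List.contains_eq_mem] using hc
    exact (hfp.append_right _).trans
      ((List.filter_append_perm (fun c => h.contains c) F).trans hFperm)
  · -- either B scanned everything (rest empty) or it stopped with 5 hits
    by_cases hm : m = lo.toList.length + 1
    · left
      rw [List.filter_eq_nil_iff]
      intro b hb
      have hbD : b ∈ D := by rwa [PySem.List.mem_sorted, PySem.List.mem_sorted] at hb
      have hbP := (hmemD b).mp hbD
      have hbh : b ∈ h := (hMem b).mpr ⟨hbP.1, hbP.2, by have := hposD b hbD; omega⟩
      simp [List.contains_eq_mem, hbh]
    · right
      exact hm_stop (by omega)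

-- A's result before truncation
theorem pvA_char (text : String) (candidates : List String) (hne : candidates ≠ []) :
    detect_heroes_py text candidates =
      PySem.List.slice
        (PySem.List.sorted
          (PySem.List.sorted (pvD (PySem.Str.lower text) candidates) pvK2 false)
          (pvK1 (PySem.Str.lower text)) false) none (some 5) := by
  unfold detect_heroes_py
  rw [if_neg hne]
  simp only []
  set lo := PySem.Str.lower text with hlo
  set S := PySem.List.sorted candidates (fun s => -(PySem.Str.len s : Int)) false with hS
  have hkey : (fun s => -(PySem.Str.len s : Int)) = pvK2 := rfl
  have hHits : (S.foldl
      (fun (st : List String × PySem.Set String) cand =>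
        if PySem.Str.isIn (PySem.Str.lower cand) lo && !(PySem.Set.contains st.2 cand)
        then (st.1 ++ [cand], PySem.Set.add st.2 cand) else st)
      ([], PySem.Set.empty)).1 = PySem.List.sorted (pvD lo candidates) pvK2 false := by
    have h0 := pvLoopA lo S []
    rw [show (PySem.Set.empty : PySem.Set String) = ([] : List String) from rfl, h0]
    rw [List.nil_append, List.filter_eq_self.mpr (by intro z hz; simp)]
    have h1 : S.filter (pvMatched lo) = PySem.List.sorted (candidates.filter (pvMatched lo)) pvK2 false := by
      rw [hS, hkey]
      exact pvFilter_sorted pvK2 (pvMatched lo) candidates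
    rw [h1, pvDedup_sorted pvK2, pvD]
  rw [hHits]
  have hIf : (if 1 < (PySem.List.sorted (pvD lo candidates) pvK2 false).length
      then PySem.List.sorted (PySem.List.sorted (pvD lo candidates) pvK2 false)
        (fun h => PySem.Str.find (PySem.Str.lower text) (PySem.Str.lower h)) false
      else PySem.List.sorted (pvD lo candidates) pvK2 false) =
      PySem.List.sorted (PySem.List.sorted (pvD lo candidates) pvK2 false)
        (pvK1 lo) false := by
    have hk1 : (fun h => PySem.Str.find (PySem.Str.lower text) (PySem.Str.lower h)) = pvK1 lo := rfl
    rw [hk1]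
    by_cases hlen : 1 < (PySem.List.sorted (pvD lo candidates) pvK2 false).length
    · rw [if_pos hlen]
    · rw [if_neg hlen, pvSorted_short _ _ hlen]
  rw [hIf]

theorem pvMain (text : String) (candidates : List String) :
    detect_heroes_py text candidates = detect_heroes_py_alt text candidates := by
  obtain ⟨h, rest, hB, hPWb, hPermb, hdisc⟩ := pvB_char text candidates
  set lo := PySem.Str.lower text with hlo
  set D := pvD lo candidates with hD
  by_cases hne : candidates = []
  · subst hne
    have hDnil : D = [] := rfl
    have hnil : h ++ rest = [] := (List.Perm.nil_eq (hDnil ▸ hPermb).symm).symm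
    have hh : h = [] := (List.append_eq_nil_iff.mp hnil).1
    rw [hB, hh]
    rfl
  · have hDnd : D.Nodup := by rw [hD, pvD]; exact PySem.List.nodup_dedup _
    have hPWa := pvA_pairwise lo D hDnd
    have hPermA : (PySem.List.sorted (PySem.List.sorted D pvK2 false) (pvK1 lo) false).Perm D :=
      (PySem.List.sorted_perm _ (pvK1 lo) false).trans (PySem.List.sorted_perm D pvK2 false)
    have heq : PySem.List.sorted (PySem.List.sorted D pvK2 false) (pvK1 lo) false = h ++ rest := by
      apply List.Perm.eq_of_pairwise _ hPWa hPWb (hPermA.trans hPermb.symm)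
      intro a b _ _ h1 h2
      exfalso
      rw [pvW] at h1 h2
      omega
    rw [pvA_char text candidates hne, hB, heq]
    rcases hdisc with hr | hlen
    · rw [hr, List.append_nil]
    · rw [PySem.List.slice_to (h ++ rest) (by norm_num), PySem.List.slice_to h (by norm_num)]
      exact List.take_append_of_le_length hlen

-- ===== VERDICT (by name: the statement is the Claim_ definition above) =====
theorem detect_heroes_py_spec : Claim_equal_detect_heroes_py := by
  intro text candidates _
  unfold Spec_detect_heroes_py
  exact pvMain text candidates
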